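-- pv_equiv track=rewrite | github.com/jovitaeliana/strustore | strustore-vector-classification/src/data/loaders.py | _extract_manufacturer
-- ===== SOURCE A (Python) =====
-- def _extract_manufacturer(item_name: str) -> str:
--     """Extract manufacturer from item name."""
--     name_lower = item_name.lower()
--
--     if 'nintendo' in name_lower:
--         return 'Nintendo'
--     elif any(term in name_lower for term in ['sony', 'playstation']):
--         return 'Sony'
--     elif any(term in name_lower for term in ['microsoft', 'xbox']):
--         return 'Microsoft'
--     elif 'sega' in name_lower:
--         return 'Sega'
--     elif 'atari' in name_lower:
--         return 'Atari'
--     else: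
--         return 'Nintendo'  # Default for this dataset
-- ===== SOURCE B (Python) =====
-- _KEYWORD_RANK = {
--     'nintendo': 0,
--     'sony': 1,
--     'playstation': 1,
--     'microsoft': 2,
--     'xbox': 2,
--     'sega': 3,
--     'atari': 4,
-- }
-- _NAMES = ['Nintendo', 'Sony', 'Microsoft', 'Sega', 'Atari']
--
-- def _extract_manufacturer(item_name: str) -> str:
--     """Collect every matching keyword's priority rank, then take the best (lowest) rank."""
--     name_lower = item_name.lower()
--     hits = [rank for kw, rank in _KEYWORD_RANK.items() if kw in name_lower]
--     return _NAMES[min(hits)] if hits else 'Nintendo'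
-- ===== Notes on version B (the rewrite author's own statement) =====
-- stated objective: alternative
-- what changed: Instead of an ordered first-match cascade, B collects the priority ranks of ALL keywords that occur in the lowercased name in one filtering pass over a flat keyword->rank dict, then returns the name at the minimum rank (default Nintendo when no keyword matches).
import Mathlib
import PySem

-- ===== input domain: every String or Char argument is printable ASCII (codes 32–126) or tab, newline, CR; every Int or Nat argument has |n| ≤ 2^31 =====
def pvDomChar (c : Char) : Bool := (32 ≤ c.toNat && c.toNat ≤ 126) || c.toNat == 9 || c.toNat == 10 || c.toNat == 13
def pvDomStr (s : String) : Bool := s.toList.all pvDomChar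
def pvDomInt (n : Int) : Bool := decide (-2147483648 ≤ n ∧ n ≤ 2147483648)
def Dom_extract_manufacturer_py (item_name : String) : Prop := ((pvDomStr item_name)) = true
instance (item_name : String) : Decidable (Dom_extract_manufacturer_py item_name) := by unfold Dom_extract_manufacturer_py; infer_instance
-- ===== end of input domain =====

-- B replaces A's first-match elif cascade by collecting the ranks of ALL matching keywords and taking the minimum rank (alternative decomposition, same cost).
-- ===== PORT A =====
def extract_manufacturer_py (item_name : String) : String :=
  let name_lower := PySem.Str.lower item_name
  if PySem.Str.isIn "nintendo" name_lower then "Nintendo"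
  else if ["sony", "playstation"].any (fun term => PySem.Str.isIn term name_lower) then "Sony"
  else if ["microsoft", "xbox"].any (fun term => PySem.Str.isIn term name_lower) then "Microsoft"
  else if PySem.Str.isIn "sega" name_lower then "Sega"
  else if PySem.Str.isIn "atari" name_lower then "Atari"
  else "Nintendo"

-- ===== PORT B =====
def keywordRank : List (String × Int) :=
  [("nintendo", 0), ("sony", 1), ("playstation", 1), ("microsoft", 2),
   ("xbox", 2), ("sega", 3), ("atari", 4)]

def mfrNames : List String := ["Nintendo", "Sony", "Microsoft", "Sega", "Atari"]

def extract_manufacturer_py_alt (item_name : String) : String :=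
  let name_lower := PySem.Str.lower item_name
  let hits := (keywordRank.filter (fun p => PySem.Str.isIn p.1 name_lower)).map Prod.snd
  match PySem.List.min? hits (fun x => x) with
  | some m => (PySem.List.pyGet? mfrNames m).getD ""   -- none unreachable: min rank is always 0..4
  | none => "Nintendo"

-- ===== PRECONDITION & SPEC =====
def Spec_extract_manufacturer_py (item_name : String) (out : String) : Prop := out = extract_manufacturer_py_alt item_name
instance (item_name : String) (out : String) : Decidable (Spec_extract_manufacturer_py item_name out) := by unfold Spec_extract_manufacturer_py; infer_instance

-- ===== CLAIM =====
def Claim_equal_extract_manufacturer_py : Prop := ∀ (item_name : String), Dom_extract_manufacturer_py item_name → Spec_extract_manufacturer_py item_name (extract_manufacturer_py item_name)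

-- ===== LEMMAS AND PROOFS =====

-- ===== VERDICT =====
theorem extract_manufacturer_py_spec : Claim_equal_extract_manufacturer_py := by
  intro item_name _
  unfold Spec_extract_manufacturer_py extract_manufacturer_py extract_manufacturer_py_alt keywordRank mfrNames
  simp only []
  by_cases h1 : PySem.Str.isIn "nintendo" (PySem.Str.lower item_name) <;>
  by_cases h2 : PySem.Str.isIn "sony" (PySem.Str.lower item_name) <;>
  by_cases h3 : PySem.Str.isIn "playstation" (PySem.Str.lower item_name) <;>
  by_cases h4 : PySem.Str.isIn "microsoft" (PySem.Str.lower item_name) <;>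
  by_cases h5 : PySem.Str.isIn "xbox" (PySem.Str.lower item_name) <;>
  by_cases h6 : PySem.Str.isIn "sega" (PySem.Str.lower item_name) <;>
  by_cases h7 : PySem.Str.isIn "atari" (PySem.Str.lower item_name) <;>
  simp_all [PySem.List.min?, PySem.List.pyGet?, PySem.List.pyIdx?]
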